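-- pv_equiv track=rewrite | github.com/981377660LMT/algorithm-study | 7_graph/带权图最短路和最小生成树/Bellman_ford/spfa/差分约束/差分约束.py | findMaxVal2
-- ===== SOURCE A (Python) =====
-- from typing import List, Tuple
--
-- INF = int(1e18)
--
-- def findMaxVal2(n: int, restrictions: List[List[int]], diff: List[int]) -> int:
--     res = [0] + [INF] * (n - 1)
--     for i, v in restrictions:
--         res[i] = min(res[i], v)
--     for i in range(n - 1):
--         res[i + 1] = min(res[i + 1], res[i] + diff[i])
--     for i in range(n - 2, -1, -1):
--         res[i] = min(res[i], res[i + 1] + diff[i])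
--     return max(res)
-- ===== SOURCE B (Python) =====
-- def findMaxVal2(n, restrictions, diff):
--     INF = int(1e18)
--     val = [0] + [INF] * (n - 1)
--     for i, v in restrictions:
--         val[i] = min(val[i], v)
--     P = [0]
--     for d in diff[: len(val) - 1]:
--         P.append(P[-1] + d)
--     m = val[0]
--     fwd = []
--     for v, p in zip(val, P):
--         m = min(m, v - p)
--         fwd.append(p + m)
--     m2 = fwd[-1] + P[-1]
--     ans = fwd[-1]
--     for f, p in reversed(list(zip(fwd, P))):
--         m2 = min(m2, f + p)
--         ans = max(ans, m2 - p)
--     return ans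
-- ===== Notes on version B (the rewrite author's own statement) =====
-- stated objective: alternative
-- what changed: replaces the two in-place directional relaxation sweeps over a mutable array with an explicit prefix-sum table of diff plus two running-minimum scans over the transformed seed (fwd[i]=P[i]+min val[j]-P[j], answer from a reverse scan of min fwd[j]+P[j]), never mutating an array by index
import Mathlib
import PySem

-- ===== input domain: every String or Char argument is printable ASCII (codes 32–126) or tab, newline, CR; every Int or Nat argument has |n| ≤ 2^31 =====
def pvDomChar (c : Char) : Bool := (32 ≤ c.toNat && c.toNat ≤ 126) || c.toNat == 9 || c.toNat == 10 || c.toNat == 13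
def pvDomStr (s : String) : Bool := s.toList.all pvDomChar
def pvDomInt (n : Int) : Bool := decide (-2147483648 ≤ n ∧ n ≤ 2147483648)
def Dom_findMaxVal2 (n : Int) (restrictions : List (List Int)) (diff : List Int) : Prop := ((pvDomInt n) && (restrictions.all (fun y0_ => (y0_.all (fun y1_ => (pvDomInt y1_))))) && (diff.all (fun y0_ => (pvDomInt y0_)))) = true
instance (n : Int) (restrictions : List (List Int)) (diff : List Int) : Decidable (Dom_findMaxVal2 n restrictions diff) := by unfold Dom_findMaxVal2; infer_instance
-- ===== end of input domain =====

-- B replaces A's two in-place directional relaxation sweeps over a mutable array by a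
-- prefix-sum table of diff plus two running-minimum scans (objective: alternative algorithm,
-- same asymptotic cost); equivalence is proved on all inputs where the Python A returns.

-- ===== PORT A =====
-- the seeding of the value array is the same Python line in both sources, so both ports share it
def pvSeedStep (res : List Int) (r : List Int) : List Int :=
  match r with
  | [i, v] => PySem.List.pySetD res i (min (PySem.List.pyGetD res i 0) v)
  | _ => res

def pvStepF (diff : List Int) (res : List Int) (i : Int) : List Int :=
  PySem.List.pySetD res (i + 1)
    (min (PySem.List.pyGetD res (i + 1) 0) (PySem.List.pyGetD res i 0 + PySem.List.pyGetD diff i 0))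

def pvStepB (diff : List Int) (res : List Int) (i : Int) : List Int :=
  PySem.List.pySetD res i
    (min (PySem.List.pyGetD res i 0) (PySem.List.pyGetD res (i + 1) 0 + PySem.List.pyGetD diff i 0))

def findMaxVal2 (n : Int) (restrictions : List (List Int)) (diff : List Int) : Int :=
  let res0 : List Int := 0 :: List.replicate (n - 1).toNat 1000000000000000000
  let res1 := restrictions.foldl pvSeedStep res0
  let res2 := (PySem.List.pyRange 0 (n - 1) 1).foldl (pvStepF diff) res1
  let res3 := (PySem.List.pyRange (n - 2) (-1) (-1)).foldl (pvStepB diff) res2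
  (PySem.List.max? res3 (fun x => x)).getD 0

-- ===== PORT B =====
def pvStepP (P : List Int) (d : Int) : List Int := P ++ [PySem.List.pyGetD P (-1) 0 + d]

def pvStepFwd (s : Int × List Int) (vp : Int × Int) : Int × List Int :=
  (min s.1 (vp.1 - vp.2), s.2 ++ [vp.2 + min s.1 (vp.1 - vp.2)])

def pvStepAns (t : Int × Int) (fp : Int × Int) : Int × Int :=
  (min t.1 (fp.1 + fp.2), max t.2 (min t.1 (fp.1 + fp.2) - fp.2))

def findMaxVal2_alt (n : Int) (restrictions : List (List Int)) (diff : List Int) : Int :=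
  let val0 : List Int := 0 :: List.replicate (n - 1).toNat 1000000000000000000
  let val := restrictions.foldl pvSeedStep val0
  let P := (PySem.List.slice diff none (some ((val.length : Int) - 1))).foldl pvStepP [0]
  let fwd := ((val.zip P).foldl pvStepFwd (PySem.List.pyGetD val 0 0, [])).2
  let r := ((fwd.zip P).reverse).foldl pvStepAns
      (PySem.List.pyGetD fwd (-1) 0 + PySem.List.pyGetD P (-1) 0, PySem.List.pyGetD fwd (-1) 0)
  r.2

-- ===== PRECONDITION & SPEC =====
-- Pre_ excludes exactly the inputs on which the Python A raises: a restriction that is not a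
-- 2-element list (ValueError) or whose index is outside the length-(1+max(n-1,0)) array
-- (IndexError, incl. Python's negative indexing), and diff shorter than n-1 (IndexError).
def Pre_findMaxVal2 (n : Int) (restrictions : List (List Int)) (diff : List Int) : Prop :=
  (∀ r ∈ restrictions, r.length = 2 ∧ PySem.Raise.InRange (1 + (n - 1).toNat) (r.headD 0)) ∧
  n - 1 ≤ (diff.length : Int)

instance (n : Int) (restrictions : List (List Int)) (diff : List Int) : Decidable (Pre_findMaxVal2 n restrictions diff) := by unfold Pre_findMaxVal2; infer_instance

def pvWitness_findMaxVal2 : Int × List (List Int) × List Int := (3, [[0, 5], [2, 7]], [2, 3])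

def Spec_findMaxVal2 (n : Int) (restrictions : List (List Int)) (diff : List Int) (out : Int) : Prop := out = findMaxVal2_alt n restrictions diff
instance (n : Int) (restrictions : List (List Int)) (diff : List Int) (out : Int) : Decidable (Spec_findMaxVal2 n restrictions diff out) := by unfold Spec_findMaxVal2; infer_instance

-- ===== CLAIM (what is proved, stated in full; the proofs are below) =====
def Claim_equal_findMaxVal2 : Prop := ∀ (n : Int) (restrictions : List (List Int)) (diff : List Int), Dom_findMaxVal2 n restrictions diff → Pre_findMaxVal2 n restrictions diff → Spec_findMaxVal2 n restrictions diff (findMaxVal2 n restrictions diff)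

-- ===== LEMMAS AND PROOFS =====

-- proof-side structural specifications of the scans
def pvPscan (c : Int) : List Int → List Int
  | [] => []
  | d :: ds => (c + d) :: pvPscan (c + d) ds

def pvFwdScan (a : Int) : List Int → List Int → List Int
  | v :: vs, d :: ds => (min v (a + d)) :: pvFwdScan (min v (a + d)) vs ds
  | _, _ => []

def pvFwdB (m : Int) : List (Int × Int) → List Int
  | [] => []
  | (v, p) :: rest => (p + min m (v - p)) :: pvFwdB (min m (v - p)) rest

def pvBwdScan : List Int → List Int → List Int
  | [], _ => []
  | [x], _ => [x]
  | x :: xs, ds => (min x ((pvBwdScan xs ds.tail).headD 0 + ds.headD 0)) :: pvBwdScan xs ds.tail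

def pvBwdStruct : List Int → List Int → List Int → List Int
  | [], _, zs => zs
  | x :: xs, ds, zs => (min x ((pvBwdStruct xs ds.tail zs).headD 0 + ds.headD 0)) :: pvBwdStruct xs ds.tail zs

def pvMaxList : List Int → Int
  | [] => 0
  | x :: t => t.foldl max x

theorem pv_len_seed (rs : List (List Int)) (xs : List Int) :
    (List.foldl pvSeedStep xs rs).length = xs.length := by
  induction rs generalizing xs with
  | nil => rfl
  | cons r rs ih =>
    simp only [List.foldl_cons]
    rw [ih]
    unfold pvSeedStep
    match r with
    | [] => rfl
    | [i] => rfl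
    | [i, v] => simp [PySem.List.length_pySetD]
    | i :: v :: w :: t => rfl

theorem pv_fwd_loop (diff : List Int) (vs : List Int) : ∀ (pre : List Int) (a : Int),
    pre.length + vs.length ≤ diff.length →
    (PySem.List.pyRange (pre.length : Int) ((pre.length : Int) + vs.length) 1).foldl (pvStepF diff) (pre ++ a :: vs)
      = pre ++ a :: pvFwdScan a vs (diff.drop pre.length) := by
  induction vs with
  | nil =>
    intro pre a h
    rw [show ((pre.length : Int) + ((List.length ([]:List Int)) : Int)) = (pre.length : Int) by simp]
    rw [PySem.List.pyRange_one_eq_nil le_rfl]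
    simp [pvFwdScan]
  | cons v vs ih =>
    intro pre a h
    simp only [List.length_cons] at h ⊢
    have hlt : (pre.length : Int) < (pre.length : Int) + ((vs.length + 1 : Nat) : Int) := by push_cast; omega
    rw [PySem.List.pyRange_one_cons hlt, List.foldl_cons]
    have hdl : pre.length < diff.length := by omega
    have hdrop : diff.drop pre.length = diff[pre.length] :: diff.drop (pre.length + 1) :=
      (List.getElem_cons_drop hdl).symm
    have hresEq : pre ++ a :: v :: vs = (pre ++ [a]) ++ v :: vs := by simp
    have hstep : pvStepF diff (pre ++ a :: v :: vs) (pre.length : Int)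
        = (pre ++ [a]) ++ (min v (a + diff[pre.length])) :: vs := by
      unfold pvStepF
      have e1 : PySem.List.pyGetD (pre ++ a :: v :: vs) ((pre.length : Int)) 0 = a := by
        rw [PySem.List.pyGetD_natCast]; simp
      have e2 : PySem.List.pyGetD (pre ++ a :: v :: vs) ((pre.length : Int) + 1) 0 = v := by
        rw [show ((pre.length : Int) + 1) = (((pre.length + 1 : Nat)) : Int) by push_cast; ring]
        rw [PySem.List.pyGetD_natCast, hresEq]
        rw [show pre.length + 1 = (pre ++ [a]).length by simp]
        simp
      have e3 : PySem.List.pyGetD diff ((pre.length : Int)) 0 = diff[pre.length] := by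
        rw [PySem.List.pyGetD_natCast]
        exact List.getD_eq_getElem diff 0 hdl
      rw [e1, e2, e3]
      rw [show ((pre.length : Int) + 1) = (((pre.length + 1 : Nat)) : Int) by push_cast; ring]
      rw [PySem.List.pySetD_natCast, hresEq]
      rw [show pre.length + 1 = (pre ++ [a]).length by simp]
      simp
    rw [hstep]
    have hrange : PySem.List.pyRange ((pre.length : Int) + 1) ((pre.length : Int) + ((vs.length + 1 : Nat) : Int)) 1
        = PySem.List.pyRange (((pre ++ [a]).length : Int)) ((((pre ++ [a]).length : Int)) + (vs.length : Int)) 1 := by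
      congr 1 <;> push_cast <;> simp <;> ring
    rw [hrange]
    rw [ih (pre ++ [a]) (min v (a + diff[pre.length])) (by simp; omega)]
    rw [hdrop]
    simp [pvFwdScan]

theorem pv_getD_tail (zs : List Int) (n : Nat) (d : Int) : zs.tail.getD n d = zs.getD (n+1) d := by
  cases zs <;> simp [List.getD]

theorem pv_bwdStruct_concat (ys : List Int) (b : Int) : ∀ (ds zs : List Int),
    pvBwdStruct (ys ++ [b]) ds zs = pvBwdStruct ys ds ((min b (zs.headD 0 + ds.getD ys.length 0)) :: zs) := by
  induction ys with
  | nil =>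
    intro ds zs
    simp [pvBwdStruct]
    cases ds <;> simp
  | cons x t ih =>
    intro ds zs
    simp only [List.cons_append, pvBwdStruct, ih, List.length_cons]
    rw [pv_getD_tail]

theorem pv_bwd_loop (diff : List Int) (ys : List Int) : ∀ (zs : List Int), zs ≠ [] →
    (PySem.List.pyRange ((ys.length : Int) - 1) (-1) (-1)).foldl (pvStepB diff) (ys ++ zs)
      = pvBwdStruct ys diff zs := by
  induction ys using List.reverseRecOn with
  | nil =>
    intro zs _
    rw [PySem.List.pyRange_neg_one_eq_nil (by simp)]
    simp [pvBwdStruct]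
  | append_singleton ys b ih =>
    intro zs hz
    obtain ⟨z, zs', rfl⟩ := List.exists_cons_of_ne_nil hz
    have hlen : (((ys ++ [b]).length : Int) - 1) = (ys.length : Int) := by simp
    rw [hlen, PySem.List.pyRange_neg_one_cons (by omega), List.foldl_cons]
    have hresEq : (ys ++ [b]) ++ z :: zs' = ys ++ b :: z :: zs' := by simp
    have hstep : pvStepB diff ((ys ++ [b]) ++ z :: zs') ((ys.length : Int))
        = ys ++ (min b (z + diff.getD ys.length 0)) :: z :: zs' := by
      unfold pvStepB
      have e1 : PySem.List.pyGetD ((ys ++ [b]) ++ z :: zs') ((ys.length : Int)) 0 = b := by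
        rw [PySem.List.pyGetD_natCast, hresEq]; simp
      have e2 : PySem.List.pyGetD ((ys ++ [b]) ++ z :: zs') ((ys.length : Int) + 1) 0 = z := by
        rw [show ((ys.length : Int) + 1) = (((ys.length + 1 : Nat)) : Int) by push_cast; ring]
        rw [PySem.List.pyGetD_natCast]
        rw [show ys.length + 1 = (ys ++ [b]).length by simp]
        simp
      have e3 : PySem.List.pyGetD diff ((ys.length : Int)) 0 = diff.getD ys.length 0 :=
        PySem.List.pyGetD_natCast diff ys.length 0
      rw [e1, e2, e3, PySem.List.pySetD_natCast, hresEq]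
      rw [show ys.length = ys.length + 0 by ring]
      rw [List.set_append_right _ _ (by omega)]
      simp
    rw [hstep]
    have : ys ++ (min b (z + diff.getD ys.length 0)) :: z :: zs'
        = ys ++ ((min b (z + diff.getD ys.length 0)) :: z :: zs') := by simp
    rw [this, ih ((min b (z + diff.getD ys.length 0)) :: z :: zs') (by simp)]
    rw [pv_bwdStruct_concat]
    simp

theorem pv_Pfold (ds : List Int) : ∀ (pre : List Int) (c : Int),
    List.foldl pvStepP (pre ++ [c]) ds = pre ++ c :: pvPscan c ds := by
  induction ds with
  | nil => intro pre c; simp [pvPscan]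
  | cons d ds ih =>
    intro pre c
    simp only [List.foldl_cons, pvPscan]
    have : pvStepP (pre ++ [c]) d = (pre ++ [c]) ++ [c + d] := by
      unfold pvStepP
      rw [PySem.List.pyGetD_neg_one_append_singleton]
    rw [this, ih (pre ++ [c]) (c + d)]
    simp

theorem pv_fwdfold (pairs : List (Int × Int)) : ∀ (m : Int) (acc : List Int),
    (List.foldl pvStepFwd (m, acc) pairs).2 = acc ++ pvFwdB m pairs := by
  induction pairs with
  | nil => intro m acc; simp [pvFwdB]
  | cons vp rest ih =>
    intro m acc
    obtain ⟨v, p⟩ := vp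
    simp only [List.foldl_cons, pvStepFwd, pvFwdB]
    rw [ih]
    simp

theorem pv_fwdAB (vs : List Int) : ∀ (ds : List Int) (c m : Int),
    pvFwdB m (vs.zip (pvPscan c ds)) = pvFwdScan (c + m) vs ds := by
  induction vs with
  | nil => intro ds c m; simp [pvFwdB, pvFwdScan]
  | cons v vs ih =>
    intro ds c m
    cases ds with
    | nil => simp [pvPscan, pvFwdB, pvFwdScan]
    | cons d ds =>
      simp only [pvPscan, List.zip_cons_cons, pvFwdB, pvFwdScan]
      congr 1
      · omega
      · rw [ih ds (c + d) (min m (v - (c + d)))]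
        congr 1
        omega

theorem pv_fwdScan_length (vs : List Int) : ∀ (ds : List Int) (a : Int), vs.length ≤ ds.length →
    (pvFwdScan a vs ds).length = vs.length := by
  induction vs with
  | nil => intro ds a h; simp [pvFwdScan]
  | cons v vs ih =>
    intro ds a h
    cases ds with
    | nil => simp at h
    | cons d ds =>
      simp only [pvFwdScan, List.length_cons]
      rw [ih ds _ (by simpa using h)]

theorem pv_fwdScan_take (vs : List Int) : ∀ (ds : List Int) (a : Int) (m : Nat), vs.length ≤ m →
    pvFwdScan a vs (ds.take m) = pvFwdScan a vs ds := by
  induction vs with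
  | nil => intro ds a m h; simp [pvFwdScan]
  | cons v vs ih =>
    intro ds a m h
    cases ds with
    | nil => simp
    | cons d ds =>
      cases m with
      | zero => simp at h
      | succ m =>
        simp only [List.take_succ_cons, pvFwdScan]
        rw [ih ds _ m (by simpa using h)]

theorem pv_bwdStruct_single (ys : List Int) : ∀ (ds : List Int) (b : Int),
    pvBwdStruct ys ds [b] = pvBwdScan (ys ++ [b]) ds := by
  induction ys with
  | nil => intro ds b; simp [pvBwdStruct, pvBwdScan]
  | cons x t ih =>
    intro ds b
    simp only [List.cons_append, pvBwdStruct]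
    rw [ih]
    cases h : t ++ [b] with
    | nil => simp at h
    | cons y ys' =>
      simp [pvBwdScan]

theorem pv_bwdScan_length (xs : List Int) : ∀ (ds : List Int), (pvBwdScan xs ds).length = xs.length := by
  induction xs with
  | nil => intro ds; simp [pvBwdScan]
  | cons x t ih =>
    intro ds
    cases t with
    | nil => simp [pvBwdScan]
    | cons y t' =>
      simp only [pvBwdScan, List.length_cons]
      rw [ih]
      simp

theorem pv_bwdScan_take (xs : List Int) : ∀ (ds : List Int) (m : Nat), xs.length ≤ m + 1 →
    pvBwdScan xs (ds.take m) = pvBwdScan xs ds := by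
  induction xs with
  | nil => intro ds m h; simp [pvBwdScan]
  | cons x t ih =>
    intro ds m h
    cases t with
    | nil => simp [pvBwdScan]
    | cons y t' =>
      have hm : 1 ≤ m := by simp at h; omega
      simp only [pvBwdScan]
      have htail : (ds.take m).tail = ds.tail.take (m - 1) := by
        cases ds with
        | nil => simp
        | cons d ds' => cases m with
          | zero => omega
          | succ m' => simp
      have hhead : (ds.take m).headD 0 = ds.headD 0 := by
        cases ds with
        | nil => simp
        | cons d ds' => cases m with
          | zero => omega
          | succ m' => simp
      rw [htail, hhead, ih ds.tail (m - 1) (by simp at h ⊢; omega)]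

theorem pv_maxList_cons (c : Int) (g : List Int) (h : g ≠ []) :
    max (pvMaxList g) c = pvMaxList (c :: g) := by
  obtain ⟨c0, g', rfl⟩ := List.exists_cons_of_ne_nil h
  show max (List.foldl max c0 g') c = List.foldl max c (c0 :: g')
  rw [List.foldl_cons]
  rw [List.foldl_assoc (op := max) (a₁ := c) (a₂ := c0)]
  rw [max_comm]

theorem pv_bwd_main (fs : List Int) : ∀ (ds : List Int) (p : Int), fs ≠ [] → ds.length = fs.length - 1 →
    List.foldr (fun x t => pvStepAns t x)
      (fs.getLastD 0 + (p :: pvPscan p ds).getLastD 0, fs.getLastD 0)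
      (fs.zip (p :: pvPscan p ds))
      = (p + (pvBwdScan fs ds).headD 0, pvMaxList (pvBwdScan fs ds)) := by
  induction fs with
  | nil => intro ds p h; exact absurd rfl h
  | cons x fs' ih =>
    intro ds p _ hlen
    cases fs' with
    | nil =>
      have : ds = [] := by simpa using List.length_eq_zero_iff.mp (by simpa using hlen)
      subst this
      simp [pvPscan, pvBwdScan, pvMaxList, pvStepAns]
      ring
    | cons y fs'' =>
      have hds : ds ≠ [] := by
        cases ds
        · simp at hlen
        · simp
      obtain ⟨d, ds', rfl⟩ := List.exists_cons_of_ne_nil hds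
      have hlast1 : (x :: y :: fs'').getLastD 0 = (y :: fs'').getLastD 0 := by
        simp [List.getLastD_eq_getLast?]
      rw [show pvPscan p (d :: ds') = (p + d) :: pvPscan (p + d) ds' from rfl]
      have hlast2 : (p :: (p + d) :: pvPscan (p + d) ds').getLastD 0 = ((p + d) :: pvPscan (p + d) ds').getLastD 0 := by
        simp [List.getLastD_eq_getLast?]
      rw [List.zip_cons_cons, List.foldr_cons]
      rw [hlast1, hlast2]
      rw [ih ds' (p + d) (by simp) (by simpa using hlen)]
      have hg' : pvBwdScan (y :: fs'') ds' ≠ [] := by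
        have := pv_bwdScan_length (y :: fs'') ds'
        intro hc; rw [hc] at this; simp at this
      have hscan : pvBwdScan (x :: y :: fs'') (d :: ds')
          = (min x ((pvBwdScan (y :: fs'') ds').headD 0 + d)) :: pvBwdScan (y :: fs'') ds' := by
        simp [pvBwdScan]
      rw [hscan]
      set g' := pvBwdScan (y :: fs'') ds' with hgdef
      unfold pvStepAns
      simp only []
      rw [Prod.mk.injEq]
      refine ⟨?_, ?_⟩
      · show min (p + d + g'.headD 0) (x + p) = p + (min x (g'.headD 0 + d) :: g').headD 0
        simp only [List.headD_cons]
        omega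
      · show max (pvMaxList g') (min (p + d + g'.headD 0) (x + p) - p) = pvMaxList (min x (g'.headD 0 + d) :: g')
        have : min (p + d + g'.headD 0) (x + p) - p = min x (g'.headD 0 + d) := by omega
        rw [this]
        exact pv_maxList_cons _ _ hg'

-- ===== VERDICT (by name: the statement is the Claim_ definition above) =====
theorem findMaxVal2_spec : Claim_equal_findMaxVal2 := by
  intro n restrictions diff _ hpre
  obtain ⟨-, hdiff⟩ := hpre
  show findMaxVal2 n restrictions diff = findMaxVal2_alt n restrictions diff
  unfold findMaxVal2 findMaxVal2_alt
  simp only []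
  set K : Nat := (n - 1).toNat with hK
  set val : List Int := restrictions.foldl pvSeedStep (0 :: List.replicate K 1000000000000000000) with hvaldef
  have hvlen : val.length = K + 1 := by
    rw [hvaldef, pv_len_seed]; simp
  have hKd : K ≤ diff.length := by omega
  obtain ⟨a, vs, hv⟩ : ∃ a vs, val = a :: vs :=
    List.exists_cons_of_ne_nil (by intro h; rw [h] at hvlen; simp at hvlen)
  have hvs : vs.length = K := by
    have := hvlen; rw [hv] at this; simpa using this
  -- A's forward pass
  have hF := pv_fwd_loop diff vs [] a (by simpa [hvs] using hKd)
  simp only [List.length_nil, Nat.cast_zero, zero_add, List.nil_append, List.drop_zero] at hF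
  have hrangeF : PySem.List.pyRange 0 (n - 1) 1 = PySem.List.pyRange 0 ((vs.length : Int)) 1 := by
    by_cases h1 : 1 ≤ n
    · congr 1
      omega
    · rw [PySem.List.pyRange_one_eq_nil (by omega), PySem.List.pyRange_one_eq_nil (by omega)]
  set f : List Int := a :: pvFwdScan a vs diff with hfdef
  have hA2 : (PySem.List.pyRange 0 (n - 1) 1).foldl (pvStepF diff) val = f := by
    rw [hrangeF, hv, hF]
  -- A's backward pass
  have hflen : f.length = K + 1 := by
    rw [hfdef]
    simp only [List.length_cons]
    rw [pv_fwdScan_length vs diff a (by omega)]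
    omega
  have hfne : f ≠ [] := by rw [hfdef]; simp
  have hdrople : f.dropLast.length = K := by simp [hflen]
  have hsplit : f.dropLast ++ [f.getLast hfne] = f := List.dropLast_append_getLast hfne
  have hrangeB : PySem.List.pyRange (n - 2) (-1) (-1)
      = PySem.List.pyRange ((f.dropLast.length : Int) - 1) (-1) (-1) := by
    by_cases h2 : 2 ≤ n
    · congr 1
      rw [hdrople]
      omega
    · rw [PySem.List.pyRange_neg_one_eq_nil (by omega),
          PySem.List.pyRange_neg_one_eq_nil (by rw [hdrople]; omega)]
  have hA3 : (PySem.List.pyRange (n - 2) (-1) (-1)).foldl (pvStepB diff) f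
      = pvBwdScan f diff := by
    have hbl := pv_bwd_loop diff f.dropLast [f.getLast hfne] (by simp)
    rw [hsplit] at hbl
    rw [hrangeB, hbl, pv_bwdStruct_single, hsplit]
  -- B's prefix-sum table
  set dt : List Int := diff.take K with hdt
  have hdtlen : dt.length = K := by simp [hdt]; omega
  have hslice : PySem.List.slice diff none (some ((val.length : Int) - 1)) = dt := by
    rw [hvlen, show ((K + 1 : Nat) : Int) - 1 = ((K : Nat) : Int) by push_cast; ring]
    exact PySem.List.slice_to_natCast diff K
  have hP : (PySem.List.slice diff none (some ((val.length : Int) - 1))).foldl pvStepP [0]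
      = 0 :: pvPscan 0 dt := by
    rw [hslice, show ([(0:Int)]) = ([] : List Int) ++ [(0:Int)] by simp, pv_Pfold]
    simp
  -- B's forward scan equals A's forward pass
  have hfwd : ((val.zip (0 :: pvPscan 0 dt)).foldl pvStepFwd (PySem.List.pyGetD val 0 0, [])).2 = f := by
    rw [hv, PySem.List.pyGetD_zero_cons, List.zip_cons_cons, pv_fwdfold]
    show pvFwdB a ((a, 0) :: vs.zip (pvPscan 0 dt)) = f
    rw [show pvFwdB a ((a, 0) :: vs.zip (pvPscan 0 dt))
        = (0 + min a (a - 0)) :: pvFwdB (min a (a - 0)) (vs.zip (pvPscan 0 dt)) from rfl]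
    rw [pv_fwdAB vs dt 0 (min a (a - 0))]
    simp only [sub_zero, min_self, zero_add]
    rw [hfdef, hdt, pv_fwdScan_take vs diff a K (by omega)]
  -- B's answer scan equals max over A's backward pass
  have hfinal : (((f.zip (0 :: pvPscan 0 dt)).reverse).foldl pvStepAns
      (PySem.List.pyGetD f (-1) 0 + PySem.List.pyGetD (0 :: pvPscan 0 dt) (-1) 0,
       PySem.List.pyGetD f (-1) 0)).2 = pvMaxList (pvBwdScan f dt) := by
    rw [List.foldl_reverse]
    rw [PySem.List.pyGetD_neg_one f 0 hfne, PySem.List.pyGetD_neg_one (0 :: pvPscan 0 dt) 0 (by simp)]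
    rw [show f.getLast hfne = f.getLastD 0 by simp [List.getLastD_eq_getLast?, List.getLast?_eq_some_getLast]]
    rw [show (0 :: pvPscan 0 dt).getLast (by simp) = (0 :: pvPscan 0 dt).getLastD 0 by
      simp [List.getLastD_eq_getLast?, List.getLast?_eq_some_getLast]]
    rw [pv_bwd_main f dt 0 hfne (by omega)]
  rw [hA2, hA3, hP, hfwd, hfinal]
  -- both sides are now max over the same backward-relaxed list
  rw [show pvBwdScan f diff = pvBwdScan f dt by rw [hdt, pv_bwdScan_take f diff K (by omega)]]
  obtain ⟨g0, gt, hg⟩ : ∃ g0 gt, pvBwdScan f dt = g0 :: gt := by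
    have hl := pv_bwdScan_length f dt
    cases hgg : pvBwdScan f dt with
    | nil => rw [hgg] at hl; rw [hflen] at hl; simp at hl
    | cons g0 gt => exact ⟨g0, gt, rfl⟩
  rw [hg, PySem.List.max?_id_cons]
  rfl
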